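-- pv_equiv track=rewrite | github.com/francescolampertico-us/ai-app-pa | app/pages/3_Disclosure_Tracker.py | _filter_report
-- ===== SOURCE A (Python) =====
-- def _filter_report(report_text: str, allowed_names: set) -> str:
--     """Filter the markdown report to only include sections for allowed entities."""
--     if not report_text:
--         return ""
--
--     import re
--
--     # Build case-insensitive lookup (report may title-case names via _title_case_name)
--     allowed_lower = {n.lower() for n in allowed_names}
--
--     # Split into sections by ## and ### headers, preserving preamble
--     lines = report_text.split("\n")
--     preamble = []  # lines before the first ## header
--     sections = []  # list of (header_line, body_lines)
--     current_header = None
--     current_body = []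
--
--     for line in lines:
--         if line.startswith("### ") or line.startswith("## "):
--             if current_header is not None:
--                 sections.append((current_header, current_body))
--             elif current_body:
--                 preamble = current_body
--             current_header = line
--             current_body = []
--         else:
--             current_body.append(line)
--     if current_header is not None:
--         sections.append((current_header, current_body))
--
--     output_lines = list(preamble)
--     in_filterable = False
--     in_fara = False
--
--     for header, body in sections:
--         if header.startswith("## "):
--             if "Lobbying Activity" in header:
--                 in_filterable = True
--                 in_fara = False
--             elif "FARA Foreign Agent" in header:
--                 in_filterable = True
--                 in_fara = True
--             else:
--                 in_filterable = False
--                 in_fara = False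
--             output_lines.append(header)
--             output_lines.extend(body)
--             continue
--
--         # ### subsections inside filterable areas
--         if header.startswith("### ") and in_filterable:
--             section_name = header[4:].strip()
--             section_text = "\n".join(body)
--             bold_names = re.findall(r'\*\*([^*]+)\*\*', section_text)
--             label_words = {"registration #", "registered", "terminated", "location",
--                            "status", "total", "client:"}
--             entity_bold = [n for n in bold_names if n.lower().rstrip(":") not in
--                            {lw.rstrip(":") for lw in label_words}]
--
--             if in_fara:
--                 # FARA: check if any FP entity in the body is in allowed
--                 relevant = any(n.lower() in allowed_lower for n in entity_bold)
--                 if not entity_bold: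
--                     relevant = section_name.lower() in allowed_lower
--             else:
--                 # LDA: check header name or bold entity names
--                 relevant = section_name.lower() in allowed_lower
--                 if not relevant:
--                     relevant = any(n.lower() in allowed_lower for n in entity_bold)
--             if relevant:
--                 output_lines.append(header)
--                 output_lines.extend(body)
--         elif header.startswith("### "):
--             output_lines.append(header)
--             output_lines.extend(body)
--
--     return "\n".join(output_lines)
-- ===== SOURCE B (Python) =====
-- import re
-- from itertools import takewhile
--
-- _LABELS = {"registration #", "registered", "terminated", "location",
--            "status", "total", "client"}
--
--
-- def _is_header(line):
--     return line.startswith("## ") or line.startswith("### ")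
--
--
-- def _relevant(header, body, fara, allowed):
--     """Does a '### ' subsection inside a filterable area mention an allowed entity?"""
--     name = header[4:].strip().lower()
--     ents = [b for b in re.findall(r'\*\*([^*]+)\*\*', "\n".join(body))
--             if b.lower().rstrip(":") not in _LABELS]
--     hit = any(e.lower() in allowed for e in ents)
--     if fara:
--         return hit if ents else name in allowed
--     return name in allowed or hit
--
--
-- def _filter_report(report_text: str, allowed_names: set) -> str:
--     """Worklist consumption: repeatedly peel one whole section (header + the run of
--     non-header lines after it) off the front of the remaining lines; the mode of a
--     '### ' section is recomputed from scratch as the nearest preceding '## ' header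
--     (looked up backwards in the headers seen so far) — no running mode flags."""
--     allowed = {n.lower() for n in allowed_names}
--     lines = report_text.split("\n")
--     pre = list(takewhile(lambda l: not _is_header(l), lines))
--     todo = lines[len(pre):]
--     out = list(pre) if todo else []   # header-less preamble/content is dropped
--     seen = []                         # headers already consumed, oldest first
--     while todo:
--         header, rest = todo[0], todo[1:]
--         body = list(takewhile(lambda l: not _is_header(l), rest))
--         todo = rest[len(body):]
--         keep = True
--         if header.startswith("### "):
--             h2 = next((h for h in reversed(seen) if h.startswith("## ")), "")
--             if "Lobbying Activity" in h2:
--                 keep = _relevant(header, body, False, allowed)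
--             elif "FARA Foreign Agent" in h2:
--                 keep = _relevant(header, body, True, allowed)
--         seen.append(header)
--         if keep:
--             out.append(header)
--             out.extend(body)
--     return "\n".join(out)
-- ===== Notes on version B (the rewrite author's own statement) =====
-- stated objective: alternative
-- what changed: Replaces A's buffered two-phase state machine (accumulate (header, body) sections line by line, then a second loop threading in_filterable/in_fara flags) with a stateless worklist consumption: each whole section is peeled off the front of the remaining lines with takewhile, and the mode of a '### ' section is recomputed independently as the nearest preceding '## ' header, found by a backward search over the headers seen so far, so no running mode flags or body buffers exist.
import Mathlib
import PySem

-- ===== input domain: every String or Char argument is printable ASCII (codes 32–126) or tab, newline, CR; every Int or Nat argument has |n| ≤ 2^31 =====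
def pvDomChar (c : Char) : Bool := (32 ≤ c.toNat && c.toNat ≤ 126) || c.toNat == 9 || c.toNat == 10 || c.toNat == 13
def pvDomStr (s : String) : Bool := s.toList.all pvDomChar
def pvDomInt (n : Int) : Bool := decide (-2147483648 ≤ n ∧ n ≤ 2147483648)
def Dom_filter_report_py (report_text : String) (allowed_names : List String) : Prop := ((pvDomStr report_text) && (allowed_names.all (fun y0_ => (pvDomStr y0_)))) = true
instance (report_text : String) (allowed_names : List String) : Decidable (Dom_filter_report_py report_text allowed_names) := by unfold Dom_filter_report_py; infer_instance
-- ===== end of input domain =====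

-- B replaces A's buffered two-phase state machine by a stateless worklist consumption:
-- whole sections are peeled off the front with takewhile, and the mode of a '### '
-- section is recomputed from the nearest preceding '## ' header; objective: alternative.

-- ===== shared primitive helpers (ports of the same Python built-ins / expressions) =====

-- s.split("\n"): "\n" ≠ "", so split? is always `some`; exact.
def pvSplitLines (s : String) : List String := (PySem.Str.split? s "\n").getD []

-- s.rstrip(":") (PySem has rstrip only for whitespace); exact: drops every trailing ':'.
def pvRstripColon (s : String) : String := String.ofList ((s.toList.reverse.dropWhile (· == ':')).reverse)

-- line.startswith("### ") or line.startswith("## ") — the header test both Pythons share.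
def pvIsHeader (line : String) : Bool := PySem.Str.startswith line "### " || PySem.Str.startswith line "## "

-- re.findall(r'\*\*([^*]+)\*\*', s): hand port (regex not in PySem), checked against CPython.
-- Scan left to right; at "**" take the maximal run of non-'*'; a nonempty run closed by "**"
-- is a match (resume after the closing "**"), otherwise advance one character.
-- fuel = length of the remaining text bounds the recursion.
def pvFindBoldAux : Nat → List Char → List String
  | 0, _ => []
  | _ + 1, [] => []
  | fuel + 1, '*' :: '*' :: rest =>
      let run := rest.takeWhile (fun c => c != '*')
      if run.isEmpty then pvFindBoldAux fuel ('*' :: rest)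
      else
        match rest.dropWhile (fun c => c != '*') with
        | '*' :: '*' :: rest2 => String.ofList run :: pvFindBoldAux fuel rest2
        | _ => pvFindBoldAux fuel ('*' :: rest)
  | fuel + 1, _ :: cs => pvFindBoldAux fuel cs

def pvFindBold (s : String) : List String := pvFindBoldAux s.toList.length s.toList

-- ===== PORT A =====

-- A's closing 'if current_header is not None: sections.append(...)'
def pvFinalize (st : List String × List (String × List String) × Option String × List String) :
    List (String × List String) :=
  match st.2.2.1 with
  | some h => st.2.1 ++ [(h, st.2.2.2)]
  | none => st.2.1

-- one iteration of A's first loop, state (preamble, sections, current_header, current_body)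
def pvAParseStep (st : List String × List (String × List String) × Option String × List String)
    (line : String) : List String × List (String × List String) × Option String × List String :=
  match st with
  | (pre, secs, curh, curb) =>
    if pvIsHeader line then
      match curh with
      | some h => (pre, secs ++ [(h, curb)], some line, [])
      | none => ((if curb.isEmpty then pre else curb), secs, some line, [])
    else (pre, secs, curh, curb ++ [line])

-- label_words and the stripped set A rebuilds per section
def pvLabelWords : PySem.Set String :=
  PySem.Set.ofList ["registration #", "registered", "terminated", "location",
                    "status", "total", "client:"]

-- one iteration of A's second loop, state (output_lines, in_filterable, in_fara)
def pvASecStep (al : PySem.Set String) (acc : List String × Bool × Bool)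
    (sec : String × List String) : List String × Bool × Bool :=
  match acc, sec with
  | (out, filt, fara), (header, body) =>
    if PySem.Str.startswith header "## " then
      if PySem.Str.isIn "Lobbying Activity" header then (out ++ [header] ++ body, true, false)
      else if PySem.Str.isIn "FARA Foreign Agent" header then (out ++ [header] ++ body, true, true)
      else (out ++ [header] ++ body, false, false)
    else if PySem.Str.startswith header "### " && filt then
      let sectionName := PySem.Str.strip (PySem.Str.slice header (some 4) none)
      let sectionText := PySem.Str.join "\n" body
      let boldNames := pvFindBold sectionText
      let stripped : PySem.Set String := PySem.Set.ofList (pvLabelWords.map pvRstripColon)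
      let entityBold := boldNames.filter
        (fun n => !(stripped.contains (pvRstripColon (PySem.Str.lower n))))
      let relevant :=
        if fara then
          let r := entityBold.any (fun n => al.contains (PySem.Str.lower n))
          if entityBold.isEmpty then al.contains (PySem.Str.lower sectionName) else r
        else
          let r := al.contains (PySem.Str.lower sectionName)
          if !r then entityBold.any (fun n => al.contains (PySem.Str.lower n)) else r
      if relevant then (out ++ [header] ++ body, filt, fara) else (out, filt, fara)
    else if PySem.Str.startswith header "### " then (out ++ [header] ++ body, filt, fara)
    else (out, filt, fara)

def filter_report_py (report_text : String) (allowed_names : List String) : String :=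
  if report_text == "" then ""
  else
    let allowedLower : PySem.Set String := PySem.Set.ofList (allowed_names.map PySem.Str.lower)
    let lines := pvSplitLines report_text
    let p := lines.foldl pvAParseStep ([], [], none, [])
    let sections := pvFinalize p
    PySem.Str.join "\n" ((sections.foldl (pvASecStep allowedLower) (p.1, false, false)).1)

-- ===== PORT B =====

-- B's _LABELS literal (the label words already stripped of ':')
def pvLabels : PySem.Set String :=
  PySem.Set.ofList ["registration #", "registered", "terminated", "location",
                    "status", "total", "client"]

-- B's _relevant helper
def pvBRelevant (al : PySem.Set String) (header : String) (body : List String)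
    (fara : Bool) : Bool :=
  let name := PySem.Str.lower (PySem.Str.strip (PySem.Str.slice header (some 4) none))
  let ents := (pvFindBold (PySem.Str.join "\n" body)).filter
    (fun b => !(pvLabels.contains (pvRstripColon (PySem.Str.lower b))))
  let hit := ents.any (fun e => al.contains (PySem.Str.lower e))
  if fara then (if ents.isEmpty then al.contains name else hit)
  else (al.contains name || hit)

-- B's while loop: peel one section (header + run of non-header lines) off `todo`;
-- `seen` is the list of headers already consumed (its backward search replaces flags)
def pvBLoop (al : PySem.Set String) (out seen todo : List String) : List String :=
  match todo with
  | [] => out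
  | header :: rest =>
    let body := rest.takeWhile (fun l => !pvIsHeader l)
    let todo' := PySem.List.slice rest (some (body.length : Int)) none
    let keep :=
      if PySem.Str.startswith header "### " then
        let h2 := (seen.reverse.find? (fun h => PySem.Str.startswith h "## ")).getD ""
        if PySem.Str.isIn "Lobbying Activity" h2 then pvBRelevant al header body false
        else if PySem.Str.isIn "FARA Foreign Agent" h2 then pvBRelevant al header body true
        else true
      else true
    pvBLoop al (if keep then out ++ [header] ++ body else out) (seen ++ [header]) todo'
termination_by todo.length
decreasing_by
  simp only [PySem.List.slice_from_natCast, List.length_drop, List.length_cons]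
  omega

def filter_report_py_alt (report_text : String) (allowed_names : List String) : String :=
  let allowed : PySem.Set String := PySem.Set.ofList (allowed_names.map PySem.Str.lower)
  let lines := pvSplitLines report_text
  let pre := lines.takeWhile (fun l => !pvIsHeader l)
  let todo := PySem.List.slice lines (some (pre.length : Int)) none
  let out := if todo.isEmpty then [] else pre
  PySem.Str.join "\n" (pvBLoop allowed out [] todo)

-- ===== PRECONDITION & SPEC =====
def Spec_filter_report_py (report_text : String) (allowed_names : List String) (out : String) : Prop := out = filter_report_py_alt report_text allowed_names
instance (report_text : String) (allowed_names : List String) (out : String) : Decidable (Spec_filter_report_py report_text allowed_names out) := by unfold Spec_filter_report_py; infer_instance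

-- ===== CLAIM (what is proved, stated in full; the proofs are below) =====
def Claim_equal_filter_report_py : Prop := ∀ (report_text : String) (allowed_names : List String), Dom_filter_report_py report_text allowed_names → Spec_filter_report_py report_text allowed_names (filter_report_py report_text allowed_names)

-- ===== LEMMAS AND PROOFS =====

-- the mode a '## ' header line induces (None/no match ↦ (False, False))
def pvMode2 (h2 : String) : Bool × Bool :=
  if PySem.Str.isIn "Lobbying Activity" h2 then (true, false)
  else if PySem.Str.isIn "FARA Foreign Agent" h2 then (true, true)
  else (false, false)

-- the mode after the headers `seen`: from the nearest '## ' header, as B looks it up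
def pvModeOf (seen : List String) : Bool × Bool :=
  pvMode2 ((seen.reverse.find? (fun h => PySem.Str.startswith h "## ")).getD "")

-- the section decomposition of a line list whose head (if any) is a header
def pvSections : List String → List (String × List String)
  | [] => []
  | h :: rest =>
      (h, rest.takeWhile (fun l => !pvIsHeader l)) ::
        pvSections (rest.dropWhile (fun l => !pvIsHeader l))
termination_by ls => ls.length
decreasing_by
  have := List.length_dropWhile_le (fun l => !pvIsHeader l) rest
  simp only [List.length_cons]
  omega

-- (proof helpers for the A side, phase 1)
def pvCollect (h : String) (b : List String) : List String → List (String × List String)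
  | [] => [(h, b)]
  | l :: ls => if pvIsHeader l then (h, b) :: pvCollect l [] ls else pvCollect h (b ++ [l]) ls

-- A rebuilds {lw.rstrip(':') ...} each section; it is B's literal _LABELS set
theorem pvLabels_eq : (PySem.Set.ofList (pvLabelWords.map pvRstripColon) : PySem.Set String) = pvLabels := by decide

-- the two header prefixes are mutually exclusive
theorem pv_h3_not_h2 (s : String) (h : PySem.Str.startswith s "### " = true) :
    PySem.Str.startswith s "## " = false := by
  simp only [PySem.Str.startswith_eq] at *
  rw [PySem.Chars.startswith_iff] at h
  obtain ⟨t, ht⟩ := h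
  rw [← Bool.not_eq_true, PySem.Chars.startswith_iff]
  rintro ⟨u, hu⟩
  rw [← ht] at hu
  simp at hu

theorem pv_h2_not_h3 (s : String) (h : PySem.Str.startswith s "## " = true) :
    PySem.Str.startswith s "### " = false := by
  by_contra hc
  rw [Bool.not_eq_false] at hc
  rw [pv_h3_not_h2 s hc] at h
  exact Bool.false_ne_true h

-- dropping the takeWhile prefix is dropWhile
theorem pvDrop_takeWhile (p : String → Bool) (rest : List String) :
    List.drop (rest.takeWhile p).length rest = rest.dropWhile p := by
  induction rest with
  | nil => simp
  | cons a l ih =>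
    by_cases hp : p a
    · simp [hp, ih]
    · simp [hp]

-- the head surviving dropWhile fails the predicate
theorem pvHead_dropWhile (p : String → Bool) (x : String) (xs rest : List String)
    (h : rest.dropWhile p = x :: xs) : p x = false := by
  induction rest with
  | nil => simp at h
  | cons a l ih =>
    by_cases hp : p a
    · simp [hp] at h; exact ih h
    · simp [hp] at h; simp [← h.1, hp]

-- B's backward search, after one more header
theorem pvModeOf_append_h2 (seen : List String) (h : String)
    (hh : PySem.Str.startswith h "## " = true) : pvModeOf (seen ++ [h]) = pvMode2 h := by
  have hh' : PySem.Chars.startswith h.toList ['#','#',' '] = true := by simpa using hh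
  simp [pvModeOf, hh']

theorem pvModeOf_append_h3 (seen : List String) (h : String)
    (hh : PySem.Str.startswith h "## " = false) : pvModeOf (seen ++ [h]) = pvModeOf seen := by
  have hh' : PySem.Chars.startswith h.toList ['#','#',' '] = false := by simpa using hh
  simp [pvModeOf, hh']

-- A's first phase keeps buffering while no header arrives
theorem pvParse_prefix (pre : List String) (hp : ∀ l ∈ pre, pvIsHeader l = false) :
    ∀ b, pre.foldl pvAParseStep ([], [], none, b) = ([], [], none, b ++ pre) := by
  induction pre with
  | nil => intro b; simp
  | cons l ls ih =>
    intro b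
    have hl : pvIsHeader l = false := hp l (by simp)
    simp only [List.foldl_cons, pvAParseStep, hl, Bool.false_eq_true, if_false]
    rw [ih (fun x hx => hp x (by simp [hx])) (b ++ [l])]
    simp

-- A's first phase, started after the first header
theorem pvParse_eq (ls : List String) :
    ∀ (pre : List String) (secs : List (String × List String)) (h : String) (curb : List String),
      (ls.foldl pvAParseStep (pre, secs, some h, curb)).1 = pre ∧
      pvFinalize (ls.foldl pvAParseStep (pre, secs, some h, curb))
        = secs ++ pvCollect h curb ls := by
  induction ls with
  | nil => intro pre secs h curb; simp [pvFinalize, pvCollect]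
  | cons l ls ih =>
    intro pre secs h curb
    by_cases hl : pvIsHeader l = true
    · simp only [List.foldl_cons, pvAParseStep, hl, if_pos, pvCollect]
      refine ⟨(ih _ _ _ _).1, ?_⟩
      rw [(ih _ _ _ _).2, List.append_assoc]
      rfl
    · simp only [List.foldl_cons, pvAParseStep, hl, Bool.false_eq_true, if_false, pvCollect]
      exact ih _ _ _ _

-- phase-1 sections = worklist sections
theorem pvCollect_eq_sections (ls : List String) : ∀ (h : String) (b : List String),
    pvCollect h b ls
      = (h, b ++ ls.takeWhile (fun l => !pvIsHeader l))
          :: pvSections (ls.dropWhile (fun l => !pvIsHeader l)) := by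
  induction ls with
  | nil => intro h b; simp [pvCollect, pvSections]
  | cons l ls ih =>
    intro h b
    by_cases hl : pvIsHeader l = true
    · simp only [pvCollect, hl, if_pos, List.takeWhile_cons, List.dropWhile_cons,
        Bool.not_true, Bool.false_eq_true, if_false]
      rw [ih l [], pvSections]
      simp
    · simp only [pvCollect, hl, Bool.false_eq_true, if_false, List.takeWhile_cons,
        List.dropWhile_cons, Bool.not_false, if_pos]
      rw [ih h (b ++ [l])]
      simp

-- one section: A's flag-threading step = B's keep decision plus the updated mode
theorem pvStep_eq (al : PySem.Set String) (out seen body : List String) (h : String)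
    (hh : pvIsHeader h = true) :
    pvASecStep al (out, (pvModeOf seen).1, (pvModeOf seen).2) (h, body)
      = ((if (if PySem.Str.startswith h "### " then
                let h2 := (seen.reverse.find? (fun x => PySem.Str.startswith x "## ")).getD ""
                if PySem.Str.isIn "Lobbying Activity" h2 then pvBRelevant al h body false
                else if PySem.Str.isIn "FARA Foreign Agent" h2 then pvBRelevant al h body true
                else true
              else true)
          then out ++ [h] ++ body else out),
         (pvModeOf (seen ++ [h])).1, (pvModeOf (seen ++ [h])).2) := by
  by_cases h2c : PySem.Str.startswith h "## " = true
  · have h3c := pv_h2_not_h3 h h2c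
    rw [pvModeOf_append_h2 seen h h2c]
    simp only [pvASecStep, pvMode2, h2c, h3c, Bool.false_eq_true, if_false, if_true]
    by_cases hL : PySem.Str.isIn "Lobbying Activity" h = true
    · simp only [hL, if_true]
    · simp only [hL, Bool.false_eq_true, if_false]
      by_cases hF : PySem.Str.isIn "FARA Foreign Agent" h = true
      · simp only [hF, if_true]
      · simp only [hF, Bool.false_eq_true, if_false]
  · have h2f : PySem.Str.startswith h "## " = false := by simpa using h2c
    have h3c : PySem.Str.startswith h "### " = true := by
      unfold pvIsHeader at hh
      rcases Bool.or_eq_true_iff.mp hh with h' | h'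
      · exact h'
      · exact absurd h' h2c
    rw [pvModeOf_append_h3 seen h h2f]
    unfold pvModeOf pvMode2
    generalize (List.find? (fun x => PySem.Str.startswith x "## ") seen.reverse).getD "" = h2s
    simp only [pvASecStep, pvBRelevant, h2f, h3c, Bool.false_eq_true, if_false, if_true]
    rw [pvLabels_eq]
    by_cases hL : PySem.Str.isIn "Lobbying Activity" h2s = true
    · simp only [hL, if_true, Bool.and_true, Bool.false_eq_true, if_false]
      generalize al.contains (PySem.Str.lower (PySem.Str.strip (PySem.Str.slice h (some 4) none))) = r
      cases r with
      | false => simp; split <;> rfl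
      | true => simp
    · simp only [hL, Bool.false_eq_true, if_false]
      by_cases hF : PySem.Str.isIn "FARA Foreign Agent" h2s = true
      · simp only [hF, if_true, Bool.and_true]
        split
        · simp
          split <;> rfl
        · simp
          split <;> rfl
      · simp only [hF, Bool.false_eq_true, if_false, Bool.and_false]
        simp

-- the core: B's worklist loop = A's flag-threading second loop over the sections
theorem pvLoop_eq (al : PySem.Set String) :
    ∀ (n : Nat) (todo : List String), todo.length ≤ n →
      (∀ h, todo.head? = some h → pvIsHeader h = true) →
      ∀ (out seen : List String),
        pvBLoop al out seen todo
          = (List.foldl (pvASecStep al) (out, (pvModeOf seen).1, (pvModeOf seen).2)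
              (pvSections todo)).1 := by
  intro n
  induction n with
  | zero =>
    intro todo hlen _ out seen
    have : todo = [] := by cases todo <;> simp_all
    subst this
    simp [pvBLoop, pvSections]
  | succ n ih =>
    intro todo hlen hhead out seen
    match todo with
    | [] => simp [pvBLoop, pvSections]
    | h :: rest =>
      have hh : pvIsHeader h = true := hhead h rfl
      have hslice : PySem.List.slice rest
          (some (((rest.takeWhile (fun l => !pvIsHeader l)).length : Nat) : Int)) none
            = rest.dropWhile (fun l => !pvIsHeader l) := by
        rw [PySem.List.slice_from_natCast, pvDrop_takeWhile]
      rw [pvBLoop, pvSections]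
      simp only [hslice, List.foldl_cons]
      rw [ih (rest.dropWhile (fun l => !pvIsHeader l))
            (by have := List.length_dropWhile_le (fun l => !pvIsHeader l) rest
                simp only [List.length_cons] at hlen; omega)
            (by intro x hx
                cases hd : rest.dropWhile (fun l => !pvIsHeader l) with
                | nil => simp [hd] at hx
                | cons y ys =>
                  simp [hd] at hx
                  have := pvHead_dropWhile (fun l => !pvIsHeader l) y ys rest hd
                  simp at this
                  rwa [← hx])]
      rw [pvStep_eq al out seen _ h hh]

-- ===== VERDICT (by name: the statement is the Claim_ definition above) =====
theorem filter_report_py_spec : Claim_equal_filter_report_py := by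
  intro rt al _
  unfold Spec_filter_report_py filter_report_py filter_report_py_alt
  by_cases hrt : rt = ""
  · subst hrt
    have h1 : pvSplitLines "" = [""] := rfl
    have h2 : List.takeWhile (fun l => !pvIsHeader l) [""] = [""] := rfl
    have h3 : PySem.List.slice [""] (some (1:Int)) none = [] := by decide
    simp [h1, h2, h3, pvBLoop]
    decide
  · rw [if_neg (by simpa using hrt)]
    dsimp only
    set als : PySem.Set String := PySem.Set.ofList (al.map PySem.Str.lower)
    set lines := pvSplitLines rt with hlines
    set pre := lines.takeWhile (fun l => !pvIsHeader l) with hpre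
    have hsl : PySem.List.slice lines (some ((pre.length : Nat) : Int)) none
        = lines.dropWhile (fun l => !pvIsHeader l) := by
      rw [PySem.List.slice_from_natCast, hpre, pvDrop_takeWhile]
    have hpresplit : lines = pre ++ lines.dropWhile (fun l => !pvIsHeader l) := by
      rw [hpre]; exact (List.takeWhile_append_dropWhile).symm
    have hprehdr : ∀ l ∈ pre, pvIsHeader l = false := by
      intro l hl
      have := List.mem_takeWhile_imp (hpre ▸ hl)
      simpa using this
    rw [hsl]
    cases hd : lines.dropWhile (fun l => !pvIsHeader l) with
    | nil =>
      -- no headers at all: both sides are ""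
      have hlines_pre : lines = pre := by rw [hpresplit, hd, List.append_nil]
      rw [hlines_pre]
      rw [pvParse_prefix pre hprehdr []]
      simp [pvFinalize, pvBLoop]
    | cons h ls =>
      have hh : pvIsHeader h = true := by
        have := pvHead_dropWhile (fun l => !pvIsHeader l) h ls lines hd
        simpa using this
      -- A side: run phase 1 over pre, then the first header, then ls
      rw [hpresplit, hd, List.foldl_append]
      rw [pvParse_prefix pre hprehdr []]
      simp only [List.nil_append, List.foldl_cons, pvAParseStep, hh, if_true]
      -- `if pre.isEmpty then [] else pre` is pre in both cases (it is [] when pre is [])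
      have hifeq : (if pre.isEmpty then ([] : List String) else pre) = pre := by
        cases hp : pre <;> simp
      rw [hifeq]
      rw [(pvParse_eq ls pre [] h []).1, (pvParse_eq ls pre [] h []).2]
      simp only [List.nil_append]
      -- B side
      simp only [List.isEmpty_cons, Bool.false_eq_true, if_false]
      rw [pvLoop_eq als (h :: ls).length (h :: ls) le_rfl
            (by intro x hx; simp at hx; rwa [← hx]) pre []]
      rw [pvCollect_eq_sections ls h []]
      simp only [List.nil_append]
      have : pvSections (h :: ls)
          = (h, ls.takeWhile (fun l => !pvIsHeader l))
              :: pvSections (ls.dropWhile (fun l => !pvIsHeader l)) := by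
        rw [pvSections]
      rw [this]
      rfl
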